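-- pv_equiv track=rewrite | github.com/coinfound/coinfound-skill | shared/coinfound_rwa/catalog.py | previous_literal
-- ===== SOURCE A (Python) =====
-- def previous_literal(parts: list[str], target: str) -> str | None:
--     try:
--         index = parts.index(target)
--     except ValueError:
--         return None
--     for part in reversed(parts[:index]):
--         if part.startswith("{") and part.endswith("}"):
--             continue
--         return part
--     return None
-- ===== SOURCE B (Python) =====
-- def previous_literal(parts: list[str], target: str) -> str | None:
--     last = None
--     for part in parts:
--         if part == target:
--             return last
--         if not (part.startswith("{") and part.endswith("}")):
--             last = part
--     return None
-- ===== Notes on version B (the rewrite author's own statement) =====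
-- stated objective: simpler
-- what changed: Replaced the index-lookup-then-reversed-slice backward scan with a single forward pass carrying a 'last non-template seen' accumulator, returning it the moment the target is found.
import Mathlib
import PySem

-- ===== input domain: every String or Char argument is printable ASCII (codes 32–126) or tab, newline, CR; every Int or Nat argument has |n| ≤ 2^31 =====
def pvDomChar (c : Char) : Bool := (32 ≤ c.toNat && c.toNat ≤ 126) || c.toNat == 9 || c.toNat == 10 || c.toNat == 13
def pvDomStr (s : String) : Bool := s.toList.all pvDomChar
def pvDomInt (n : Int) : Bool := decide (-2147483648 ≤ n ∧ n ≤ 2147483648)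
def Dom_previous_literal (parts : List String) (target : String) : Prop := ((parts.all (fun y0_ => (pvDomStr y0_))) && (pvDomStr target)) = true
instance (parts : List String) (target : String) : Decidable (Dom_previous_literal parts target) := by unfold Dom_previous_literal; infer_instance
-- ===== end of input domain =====

-- B replaces A's index-lookup + reversed-slice backward scan with one forward pass carrying a
-- "last non-template seen" accumulator (objective: simpler).

-- ===== PORT A =====
-- the 'for part in reversed(parts[:index])' loop of A
def pvRevScan (xs : List String) : Option String :=
  match xs with
  | [] => none
  | part :: rest =>
    if PySem.Str.startswith part "{" && PySem.Str.endswith part "}" then pvRevScan rest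
    else some part

def previous_literal (parts : List String) (target : String) : Option String :=
  match PySem.List.index? parts target with
  | none => none  -- ValueError → return None
  | some index => pvRevScan (PySem.List.slice parts none (some (index : Int))).reverse

-- ===== PORT B =====
-- forward pass with accumulator 'last'
def pvFwdScan (target : String) (xs : List String) (last : Option String) : Option String :=
  match xs with
  | [] => none
  | part :: rest =>
    if part == target then last
    else if !(PySem.Str.startswith part "{" && PySem.Str.endswith part "}") then
      pvFwdScan target rest (some part)
    else pvFwdScan target rest last

def previous_literal_alt (parts : List String) (target : String) : Option String :=
  pvFwdScan target parts none

-- ===== PRECONDITION & SPEC =====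
def Spec_previous_literal (parts : List String) (target : String) (out : Option String) : Prop := out = previous_literal_alt parts target
instance (parts : List String) (target : String) (out : Option String) : Decidable (Spec_previous_literal parts target out) := by unfold Spec_previous_literal; infer_instance

-- ===== CLAIM (what is proved, stated in full; the proofs are below) =====
def Claim_equal_previous_literal : Prop := ∀ (parts : List String) (target : String), Dom_previous_literal parts target → Spec_previous_literal parts target (previous_literal parts target)

-- ===== LEMMAS AND PROOFS =====

theorem pvRevScan_append (ys : List String) (p : String) :
    pvRevScan (ys ++ [p]) = (pvRevScan ys).or (pvRevScan [p]) := by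
  induction ys with
  | nil => simp [pvRevScan]
  | cons y ys ih =>
      by_cases hy : (PySem.Str.startswith y "{" && PySem.Str.endswith y "}") = true
      · simp only [List.cons_append, pvRevScan, if_pos hy]; exact ih
      · simp only [List.cons_append, pvRevScan, if_neg hy]; rfl

-- invariant of B's forward pass: it computes the rightmost non-template before the first
-- occurrence of target (falling back to the accumulator), or none if target is absent
theorem pvRevScan_single (p : String) :
    pvRevScan [p] = if PySem.Str.startswith p "{" && PySem.Str.endswith p "}" then none else some p := rfl

-- invariant of B's forward pass: it computes the rightmost non-template before the first
-- occurrence of target (falling back to the accumulator), or none if target is absent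
theorem pvFwdScan_eq (target : String) (xs : List String) (last : Option String) :
    pvFwdScan target xs last =
      match PySem.List.index? xs target with
      | none => none
      | some i => (pvRevScan (xs.take i).reverse).or last := by
  induction xs generalizing last with
  | nil => simp [pvFwdScan, PySem.List.index?, List.idxOf?]
  | cons p rest ih =>
      by_cases hp : p = target
      · subst hp
        rw [PySem.List.index?_cons_self]
        simp [pvFwdScan, pvRevScan]
      · rw [PySem.List.index?_cons_of_ne rest hp]
        have hbeq : (p == target) = false := beq_false_of_ne hp
        by_cases ht : (PySem.Str.startswith p "{" && PySem.Str.endswith p "}") = true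
        · -- template: accumulator unchanged
          simp only [pvFwdScan, hbeq, Bool.false_eq_true, if_false, ht, Bool.not_true,
            Bool.false_eq_true, if_false]
          rw [ih last]
          cases h : PySem.List.index? rest target with
          | none => simp
          | some i =>
              simp only [Option.map_some]
              rw [show List.take (i + 1) (p :: rest) = p :: rest.take i from rfl]
              rw [show (p :: rest.take i).reverse = (rest.take i).reverse ++ [p] by simp]
              rw [pvRevScan_append, pvRevScan_single, if_pos ht]
              simp [Option.or_assoc]
        · -- non-template: accumulator becomes some p
          have ht' : (PySem.Str.startswith p "{" && PySem.Str.endswith p "}") = false := by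
            simpa using ht
          simp only [pvFwdScan, hbeq, Bool.false_eq_true, if_false, ht', Bool.not_false, if_true]
          rw [ih (some p)]
          cases h : PySem.List.index? rest target with
          | none => simp
          | some i =>
              simp only [Option.map_some]
              rw [show List.take (i + 1) (p :: rest) = p :: rest.take i from rfl]
              rw [show (p :: rest.take i).reverse = (rest.take i).reverse ++ [p] by simp]
              rw [pvRevScan_append, pvRevScan_single, if_neg ht]
              simp [Option.or_assoc]

-- ===== VERDICT (by name: the statement is the Claim_ definition above) =====
theorem previous_literal_spec : Claim_equal_previous_literal := by
  intro parts target _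
  unfold Spec_previous_literal previous_literal previous_literal_alt
  rw [pvFwdScan_eq]
  cases h : PySem.List.index? parts target with
  | none => simp
  | some i =>
      simp [PySem.List.slice_to_natCast]
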